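-- pv_equiv track=rewrite | github.com/KaiPatel22/PythonCourse | collectionsExercises.py | generate_leap_years
-- ===== SOURCE A (Python) =====
-- def generate_leap_years(startYear):
--     leapYears = []
--     currentYear = startYear
--     isLeapYear = False
--     while len(leapYears) < 15:
--         if (currentYear % 4 == 0 and currentYear % 100 != 0) or (currentYear % 400 == 0):
--             isLeapYear = True
--
--         if isLeapYear:
--             leapYears.append(currentYear)
--             currentYear += 4
--         else:
--             currentYear += 1
--     return leapYears
-- ===== SOURCE B (Python) =====
-- def generate_leap_years(startYear):
--     # closed form: round up to the next multiple of 4; the only non-leap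
--     # multiple of 4 is a century not divisible by 400, and then the next
--     # multiple of 4 is always leap
--     c = startYear + (-startYear) % 4
--     if c % 100 == 0 and c % 400 != 0:
--         c += 4
--     # A's sticky flag appends every 4th year unconditionally after the first hit
--     return list(range(c, c + 60, 4))
-- ===== Notes on version B (the rewrite author's own statement) =====
-- stated objective: simpler
-- what changed: A's sticky-flag search loop is replaced entirely by closed-form arithmetic: the first leap year is computed directly (round up to the next multiple of 4, skip a non-400 century), then the 15 results come from a single step-4 range call with no loop, no flag and no per-element leap test.
import Mathlib
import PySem

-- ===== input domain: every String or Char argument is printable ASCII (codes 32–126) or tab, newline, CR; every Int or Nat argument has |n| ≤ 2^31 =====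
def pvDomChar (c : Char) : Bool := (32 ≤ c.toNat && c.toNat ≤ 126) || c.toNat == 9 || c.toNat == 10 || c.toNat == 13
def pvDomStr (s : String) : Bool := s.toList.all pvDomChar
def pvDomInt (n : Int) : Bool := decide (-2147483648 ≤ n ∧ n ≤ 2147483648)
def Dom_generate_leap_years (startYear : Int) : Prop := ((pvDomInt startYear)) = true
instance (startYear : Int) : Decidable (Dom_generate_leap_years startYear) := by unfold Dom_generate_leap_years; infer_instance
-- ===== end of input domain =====

-- B replaces A's sticky-flag search loop by closed-form modular arithmetic for the
-- first leap year plus a single range call (objective: simpler). Return values only.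

-- ===== PORT A =====
-- the Gregorian leap test that A writes inline
def pvLeap (y : Int) : Bool :=
  (PySem.Int.mod y 4 == 0 && !(PySem.Int.mod y 100 == 0)) || PySem.Int.mod y 400 == 0

-- A's while-loop, state (leapYears, currentYear, isLeapYear); fuel only makes the
-- recursion total — 22 steps always suffice (≤ 7 search steps + 15 appends)
def pvLoopA : Nat → List Int → Int → Bool → List Int
  | 0, leapYears, _, _ => leapYears
  | fuel + 1, leapYears, currentYear, isLeapYear =>
    if leapYears.length < 15 then
      let isLeapYear' := if pvLeap currentYear then true else isLeapYear
      if isLeapYear' then pvLoopA fuel (leapYears ++ [currentYear]) (currentYear + 4) isLeapYear'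
      else pvLoopA fuel leapYears (currentYear + 1) isLeapYear'
    else leapYears

def generate_leap_years (startYear : Int) : List Int :=
  pvLoopA 22 [] startYear false

-- ===== PORT B =====
def generate_leap_years_alt (startYear : Int) : List Int :=
  let c0 := startYear + PySem.Int.mod (-startYear) 4
  let c := if PySem.Int.mod c0 100 == 0 && !(PySem.Int.mod c0 400 == 0) then c0 + 4 else c0
  PySem.List.pyRange c (c + 60) 4

-- ===== PRECONDITION & SPEC =====
def Spec_generate_leap_years (startYear : Int) (out : List Int) : Prop := out = generate_leap_years_alt startYear
instance (startYear : Int) (out : List Int) : Decidable (Spec_generate_leap_years startYear out) := by unfold Spec_generate_leap_years; infer_instance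

-- ===== CLAIM =====
def Claim_equal_generate_leap_years : Prop := ∀ (startYear : Int), Dom_generate_leap_years startYear → Spec_generate_leap_years startYear (generate_leap_years startYear)

-- ===== LEMMAS AND PROOFS =====

-- proof device: the first leap year at or after y as a bounded linear search
def pvFindB : Nat → Int → Int
  | 0, y => y
  | fuel + 1, y => if pvLeap y then y else pvFindB fuel (y + 1)

-- B's closed-form first leap year, as a named function for the proofs
def pvC (y : Int) : Int :=
  let c0 := y + PySem.Int.mod (-y) 4
  if PySem.Int.mod c0 100 == 0 && !(PySem.Int.mod c0 400 == 0) then c0 + 4 else c0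

-- the step-4 arithmetic progression of length n starting at y
def pvAP (y : Int) : Nat → List Int
  | 0 => []
  | n + 1 => y :: pvAP (y + 4) n

theorem pvLeap_congr (y m : Int) (h : (400:Int) ∣ (y - m)) : pvLeap y = pvLeap m := by
  have e4 : ∀ z : Int, PySem.Int.mod z 4 = z % 4 :=
    fun z => PySem.Int.mod_eq_emod_of_pos (by norm_num)
  have e100 : ∀ z : Int, PySem.Int.mod z 100 = z % 100 :=
    fun z => PySem.Int.mod_eq_emod_of_pos (by norm_num)
  have e400 : ∀ z : Int, PySem.Int.mod z 400 = z % 400 :=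
    fun z => PySem.Int.mod_eq_emod_of_pos (by norm_num)
  have h4 : y % 4 = m % 4 := by omega
  have h100 : y % 100 = m % 100 := by omega
  have h400 : y % 400 = m % 400 := by omega
  simp only [pvLeap, e4, e100, e400, h4, h100, h400]

-- the append phase: once the flag is true the loop appends step-4 unconditionally
theorem pvLoopA_append (n : Nat) : ∀ (fuel : Nat) (acc : List Int) (y : Int),
    acc.length + n = 15 → n ≤ fuel →
    pvLoopA fuel acc y true = acc ++ pvAP y n := by
  induction n with
  | zero =>
    intro fuel acc y hlen _
    cases fuel with
    | zero => simp [pvLoopA, pvAP]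
    | succ f => simp [pvLoopA, pvAP]; omega
  | succ n ih =>
    intro fuel acc y hlen hfuel
    cases fuel with
    | zero => omega
    | succ f =>
      have hlt : acc.length < 15 := by omega
      have hstep : pvLoopA (f + 1) acc y true = pvLoopA f (acc ++ [y]) (y + 4) true := by
        simp [pvLoopA, hlt]
      rw [hstep, ih f (acc ++ [y]) (y + 4) (by simp; omega) (by omega)]
      simp [pvAP]

-- search phase simulation: while the flag is false A advances exactly like pvFindB
theorem pvLoopA_search (f : Nat) : ∀ (y : Int), pvLeap (pvFindB f y) = true →
    pvLoopA (f + 15) [] y false = pvAP (pvFindB f y) 15 := by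
  induction f with
  | zero =>
    intro y hy
    simp [pvFindB] at hy ⊢
    have h1 : pvLoopA 15 ([] : List Int) y false = pvLoopA 14 [y] (y + 4) true := by
      simp [pvLoopA, hy]
    rw [h1, pvLoopA_append 14 14 [y] (y + 4) (by simp) (by omega)]
    simp [pvAP]
  | succ f ih =>
    intro y hy
    by_cases hl : pvLeap y = true
    · have hfind : pvFindB (f + 1) y = y := by simp [pvFindB, hl]
      rw [hfind]
      have h1 : pvLoopA (f + 1 + 15) ([] : List Int) y false = pvLoopA (f + 15) [y] (y + 4) true := by
        rw [show f + 1 + 15 = (f + 15) + 1 by omega, pvLoopA]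
        simp [hl]
      rw [h1, pvLoopA_append 14 (f + 15) [y] (y + 4) (by simp) (by omega)]
      simp [pvAP]
    · have hl' : pvLeap y = false := by simpa using hl
      have hfind : pvFindB (f + 1) y = pvFindB f (y + 1) := by simp [pvFindB, hl']
      rw [hfind] at hy ⊢
      have h1 : pvLoopA (f + 1 + 15) ([] : List Int) y false = pvLoopA (f + 15) [] (y + 1) false := by
        rw [show f + 1 + 15 = (f + 15) + 1 by omega, pvLoopA]
        simp [hl']
      rw [h1, ih (y + 1) hy]

-- pvFindB's offset and found-value only depend on y mod 400
theorem pvFindB_congr (f : Nat) : ∀ (y m : Int), (400:Int) ∣ (y - m) →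
    pvFindB f y - y = pvFindB f m - m ∧ pvLeap (pvFindB f y) = pvLeap (pvFindB f m) := by
  induction f with
  | zero => intro y m h; exact ⟨by simp [pvFindB], by simp [pvFindB, pvLeap_congr y m h]⟩
  | succ f ih =>
    intro y m h
    have hle : pvLeap y = pvLeap m := pvLeap_congr y m h
    by_cases hl : pvLeap y = true
    · have hm : pvLeap m = true := hle ▸ hl
      simp [pvFindB, hl, hm]
    · have hl' : pvLeap y = false := by simpa using hl
      have hm' : pvLeap m = false := hle ▸ hl'
      have hy2 : pvFindB (f + 1) y = pvFindB f (y + 1) := by simp [pvFindB, hl']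
      have hm2 : pvFindB (f + 1) m = pvFindB f (m + 1) := by simp [pvFindB, hm']
      obtain ⟨h1, h2⟩ := ih (y + 1) (m + 1) (by omega)
      rw [hy2, hm2]
      exact ⟨by omega, h2⟩

-- pvC's offset only depends on y mod 400
theorem pvC_congr (y m : Int) (h : (400:Int) ∣ (y - m)) : pvC y - y = pvC m - m := by
  have e4 : ∀ z : Int, PySem.Int.mod z 4 = z % 4 :=
    fun z => PySem.Int.mod_eq_emod_of_pos (by norm_num)
  have e100 : ∀ z : Int, PySem.Int.mod z 100 = z % 100 :=
    fun z => PySem.Int.mod_eq_emod_of_pos (by norm_num)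
  have e400 : ∀ z : Int, PySem.Int.mod z 400 = z % 400 :=
    fun z => PySem.Int.mod_eq_emod_of_pos (by norm_num)
  have h0 : (-y) % 4 = (-m) % 4 := by omega
  have h100 : (y + (-m) % 4) % 100 = (m + (-m) % 4) % 100 := by omega
  have h400 : (y + (-m) % 4) % 400 = (m + (-m) % 4) % 400 := by omega
  simp only [pvC, e4, e100, e400, h0, h100, h400]
  split <;> omega

-- for all 400 residues the linear search and the closed form agree, and the
-- search succeeds within 7 steps
set_option maxRecDepth 8000 in
theorem pvFind_residues : ∀ m ∈ List.range 400,
    pvFindB 7 (m : Int) = pvC (m : Int) ∧ pvLeap (pvFindB 7 (m : Int)) = true := by decide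

theorem pvFindB_eq_pvC (y : Int) : pvFindB 7 y = pvC y ∧ pvLeap (pvFindB 7 y) = true := by
  have hm := Int.emod_nonneg y (by norm_num : (400:Int) ≠ 0)
  have hmlt := Int.emod_lt_of_pos y (by norm_num : (0:Int) < 400)
  set m : Int := y % 400 with hmdef
  have hdvd : (400:Int) ∣ (y - m) := by omega
  obtain ⟨n, hn, hmn⟩ : ∃ n : Nat, n < 400 ∧ m = (n : Int) := ⟨m.toNat, by omega, by omega⟩
  obtain ⟨hres, hleap⟩ := pvFind_residues n (List.mem_range.mpr hn)
  obtain ⟨hoff, hlp⟩ := pvFindB_congr 7 y m hdvd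
  have hcc := pvC_congr y m hdvd
  rw [hmn] at hoff hlp hcc
  refine ⟨by omega, ?_⟩
  rw [hlp]; exact hleap

-- B's range call is exactly the 15-element step-4 progression
theorem pyRange_eq_pvAP (c : Int) : PySem.List.pyRange c (c + 60) 4 = pvAP c 15 := by
  rw [PySem.List.pyRange_of_pos c (c + 60) (by norm_num)]
  have hlt : c < c + 60 := by omega
  simp [hlt, pvAP]
  norm_num [List.range_succ]
  omega

-- ===== VERDICT (by name: the statement is the Claim_ definition above) =====
theorem generate_leap_years_spec : Claim_equal_generate_leap_years := by
  intro startYear _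
  unfold Spec_generate_leap_years
  have halt : generate_leap_years_alt startYear
      = PySem.List.pyRange (pvC startYear) (pvC startYear + 60) 4 := rfl
  rw [halt, pyRange_eq_pvAP]
  obtain ⟨heq, hleap⟩ := pvFindB_eq_pvC startYear
  have h := pvLoopA_search 7 startYear hleap
  simp only [show (7:Nat) + 15 = 22 from rfl] at h
  unfold generate_leap_years
  rw [h, heq]
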